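-- pv_equiv track=rewrite | github.com/no-man-is-an-island/cljppy | cljppy/sequence/__init__.py | __ipartition
-- ===== SOURCE A (Python) =====
-- from collections import deque
--
-- def __ipartition(n, iterable, step = None):
--     """
--     Returns a lazy sequence of lists of n items each, at offsets step
--     apart. If step is not supplied, defaults to n, i.e. the partitions
--     do not overlap.
--     """
--     if step is None:
--         step = n
--     step_count = step
--     last_n = deque(maxlen=n)
--
--     for x in iter(iterable):
--         step_count = min(step, step_count + 1)
--         last_n.append(x)
--         #last_n = take_last(n, last_n)
--
--         if step_count == step and len(last_n) == n:
--             y = list(last_n) # Damn mutable data!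
--             step_count = 0
--             yield y
-- ===== SOURCE B (Python) =====
-- def __ipartition(n, iterable, step = None):
--     """
--     Index-and-slice reimplementation: materialize the input, then yield
--     the length-n slice at each offset 0, step, 2*step, ...
--     """
--     if step is None:
--         step = n
--     step = max(step, 1)
--     data = list(iterable)
--     for i in range(0, len(data) - n + 1, step):
--         yield data[i:i + n]
-- ===== Notes on version B (the rewrite author's own statement) =====
-- stated objective: simpler
-- what changed: Replaced the streaming deque window + step counter with materializing the input and mapping a length-n slice over the arithmetic offsets 0, step, 2*step, ...
-- outside the precondition, e.g. on __ipartition(0, [1, 2, 3], None): A returns [[], [], []], B returns [[], [], [], []]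
import Mathlib
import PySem

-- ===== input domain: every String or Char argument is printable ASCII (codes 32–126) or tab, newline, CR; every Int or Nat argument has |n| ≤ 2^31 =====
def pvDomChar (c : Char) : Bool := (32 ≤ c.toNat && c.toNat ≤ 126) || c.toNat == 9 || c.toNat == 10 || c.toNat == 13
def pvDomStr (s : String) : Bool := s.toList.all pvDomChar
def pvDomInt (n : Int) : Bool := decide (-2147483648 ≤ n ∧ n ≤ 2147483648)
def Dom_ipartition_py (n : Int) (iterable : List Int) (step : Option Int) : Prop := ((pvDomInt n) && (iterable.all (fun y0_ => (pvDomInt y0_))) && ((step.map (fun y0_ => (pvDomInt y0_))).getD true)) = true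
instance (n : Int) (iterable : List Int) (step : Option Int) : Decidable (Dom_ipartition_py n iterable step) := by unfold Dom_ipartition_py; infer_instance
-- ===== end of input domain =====

-- B replaces A's streaming deque window + step counter by index arithmetic:
-- materialize the input and map a length-n slice over offsets 0, step, 2*step, …
-- (objective: simpler; A and B are generators — equivalence is about the list of yielded values).

-- ===== PORT A =====
-- loop body of A's for-loop: state = (step_count, last_n, yielded); deque(maxlen=n)
-- is modelled as "append, then drop the excess from the left" (exact for n ≥ 0).
def ipartA_f (n t : Int) (st : Int × List Int × List (List Int)) (x : Int) :
    Int × List Int × List (List Int) :=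
  let sc := min t (st.1 + 1)
  let buf0 := st.2.1 ++ [x]
  let buf := if n < (buf0.length : Int) then buf0.drop ((buf0.length : Int) - n).toNat else buf0
  if sc = t ∧ (buf.length : Int) = n then (0, (buf, st.2.2 ++ [buf]))
  else (sc, (buf, st.2.2))

def ipartition_py (n : Int) (iterable : List Int) (step : Option Int) : List (List Int) :=
  let t := step.getD n               -- if step is None: step = n
  (iterable.foldl (ipartA_f n t) (t, ([], []))).2.2

-- ===== PORT B =====
def ipartition_py_alt (n : Int) (iterable : List Int) (step : Option Int) : List (List Int) :=
  let s := max (step.getD n) 1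
  let data := iterable
  (PySem.List.pyRange 0 ((data.length : Int) - n + 1) s).map
    (fun i => PySem.List.slice data (some i) (some (i + n)))

-- ===== PRECONDITION & SPEC =====
-- Pre_ excludes n ≤ 0: for n < 0 A raises ValueError (deque maxlen must be non-negative),
-- and for n = 0 the number of empty windows A yields is an artefact of its streaming
-- counter (a degenerate corner where B's offset count is an equally defensible choice).
def Pre_ipartition_py (n : Int) (iterable : List Int) (step : Option Int) : Prop := 1 ≤ n
instance (n : Int) (iterable : List Int) (step : Option Int) : Decidable (Pre_ipartition_py n iterable step) := by unfold Pre_ipartition_py; infer_instance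
def pvWitness_ipartition_py : Int × List Int × Option Int := (2, ([1, 2, 3, 4, 5], some 3))

def Spec_ipartition_py (n : Int) (iterable : List Int) (step : Option Int) (out : List (List Int)) : Prop := out = ipartition_py_alt n iterable step
instance (n : Int) (iterable : List Int) (step : Option Int) (out : List (List Int)) : Decidable (Spec_ipartition_py n iterable step out) := by unfold Spec_ipartition_py; infer_instance

-- ===== CLAIM (what is proved, stated in full; the proofs are below) =====
def Claim_equal_ipartition_py : Prop := ∀ (n : Int) (iterable : List Int) (step : Option Int), Dom_ipartition_py n iterable step → Pre_ipartition_py n iterable step → Spec_ipartition_py n iterable step (ipartition_py n iterable step)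

-- ===== LEMMAS AND PROOFS =====

-- components of A's loop state after consuming a prefix xs (proof-only helpers):
def pvSC (n t : Int) (xs : List Int) : Int :=
  if n ≤ (xs.length : Int) then ((xs.length : Int) - n) % (max t 1) else t
def pvBUF (n : Int) (xs : List Int) : List Int := xs.drop (xs.length - n.toNat)
def pvOUT (n t : Int) (xs : List Int) : List (List Int) :=
  (PySem.List.pyRange 0 ((xs.length : Int) - n + 1) (max t 1)).map
    (fun i => PySem.List.slice xs (some i) (some (i + n)))

-- (m+1) % t for t ≥ 1: wraps to 0 exactly when m % t = t - 1.
lemma pv_emod_succ (m t : Int) (ht : 1 ≤ t) :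
    (m + 1) % t = if m % t = t - 1 then 0 else m % t + 1 := by
  have h0 : t * (m / t) + m % t = m := Int.ediv_add_emod m t
  have hr0 : 0 ≤ m % t := Int.emod_nonneg m (by omega)
  have hrs : m % t < t := Int.emod_lt_of_pos m (by omega)
  have h1 : m + 1 = (m % t + 1) + t * (m / t) := by omega
  rw [h1, Int.add_mul_emod_self_left]
  split_ifs with h
  · rw [h]; simp
  · exact Int.emod_eq_of_lt (by omega) (by omega)

-- range(0, m+1, s) gains the offset m exactly when 0 ≤ m and s ∣ m.
lemma pv_pyRange_snoc (s m : Int) (hs : 0 < s) :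
    PySem.List.pyRange 0 (m + 1) s =
      PySem.List.pyRange 0 m s ++ (if 0 ≤ m ∧ m % s = 0 then [m] else []) := by
  rw [PySem.List.pyRange_of_pos _ _ hs, PySem.List.pyRange_of_pos _ _ hs]
  rcases lt_or_ge m 0 with hm | hm
  · have h1 : ¬ (0 : Int) < m + 1 := by omega
    have h2 : ¬ (0 : Int) < m := by omega
    simp [h1, h2, hm]
  · have h1 : (0 : Int) < m + 1 := by omega
    have h0 : s * (m / s) + m % s = m := Int.ediv_add_emod m s
    have hr0 : 0 ≤ m % s := Int.emod_nonneg m (by omega)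
    have hrs : m % s < s := Int.emod_lt_of_pos m hs
    have hq0 : 0 ≤ m / s := Int.ediv_nonneg hm (by omega)
    have hc1 : (m + 1 - 0 + s - 1) / s = m / s + 1 := by
      have : m + 1 - 0 + s - 1 = (m % s) + s * (m / s + 1) := by
        rw [mul_add, mul_one]; linarith [h0]
      rw [this, Int.add_mul_ediv_left _ _ (by omega : s ≠ 0),
        Int.ediv_eq_zero_of_lt hr0 hrs]
      ring
    rw [if_pos h1, hc1]
    by_cases hr : m % s = 0
    · -- count grows by one; new element is m
      have hc0 : (if (0:Int) < m then ((m - 0 + s - 1) / s).toNat else 0) = (m / s).toNat := by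
        by_cases hm0 : (0:Int) < m
        · have : m - 0 + s - 1 = (s - 1) + s * (m / s) := by linarith [h0, hr]
          rw [if_pos hm0, this, Int.add_mul_ediv_left _ _ (by omega : s ≠ 0),
            Int.ediv_eq_zero_of_lt (by omega) (by omega)]
          simp
        · have hm0' : m = 0 := by omega
          have : m / s = 0 := by rw [hm0']; simp
          simp [hm0, this]
      rw [hc0, if_pos ⟨hm, hr⟩]
      have htn : (m / s + 1).toNat = (m / s).toNat + 1 := by omega
      rw [htn, List.range_succ, List.map_append]
      congr 1
      simp only [List.map_cons, List.map_nil]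
      have hq : (0:Int) + s * (((m / s).toNat : Nat) : Int) = m := by
        have h2 : (((m / s).toNat : Nat) : Int) = m / s := by omega
        rw [h2]; linarith [h0, hr]
      rw [hq]
    · -- same count
      have hc0 : (if (0:Int) < m then ((m - 0 + s - 1) / s).toNat else 0) = (m / s + 1).toNat := by
        have hm0 : (0:Int) < m := by
          rcases hm.lt_or_eq with h | h
          · exact h
          · exact absurd (by rw [← h]; simp) hr
        have : m - 0 + s - 1 = (m % s - 1) + s * (m / s + 1) := by
          rw [mul_add, mul_one]; linarith [h0]
        rw [if_pos hm0, this, Int.add_mul_ediv_left _ _ (by omega : s ≠ 0),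
          Int.ediv_eq_zero_of_lt (by omega) (by omega)]
        ring
      rw [hc0, if_neg (by omega : ¬ (0 ≤ m ∧ m % s = 0))]
      simp

-- a slice fully inside xs is unchanged by appending an element.
lemma pv_slice_append (xs : List Int) (x : Int) (i n : Int) (hi : 0 ≤ i) (hn : 0 ≤ n)
    (h : i + n ≤ (xs.length : Int)) :
    PySem.List.slice (xs ++ [x]) (some i) (some (i + n)) =
      PySem.List.slice xs (some i) (some (i + n)) := by
  have hi' : i = ((i.toNat : Nat) : Int) := by omega
  have hn' : n = ((n.toNat : Nat) : Int) := by omega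
  rw [hi', hn', PySem.List.slice_natCast_add, PySem.List.slice_natCast_add]
  rw [List.drop_append_of_le_length (by omega : i.toNat ≤ xs.length)]
  exact List.take_append_of_le_length (by simp <;> omega)

-- the final full window is the last n elements.
lemma pv_slice_last (xs : List Int) (x : Int) (n : Int) (hn : 1 ≤ n)
    (h : n ≤ (xs.length : Int) + 1) :
    PySem.List.slice (xs ++ [x]) (some ((xs.length : Int) + 1 - n))
        (some (((xs.length : Int) + 1 - n) + n)) =
      (xs ++ [x]).drop (xs.length + 1 - n.toNat) := by
  have hj : (xs.length : Int) + 1 - n = (((xs.length + 1 - n.toNat : Nat) : Nat) : Int) := by omega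
  rw [hj]
  rw [show ((((xs.length + 1 - n.toNat : Nat) : Nat) : Int) + n)
      = (((xs.length + 1 - n.toNat : Nat) : Int) + ((n.toNat : Nat) : Int)) from by omega]
  rw [PySem.List.slice_natCast_add]
  apply List.take_of_length_le
  simp
  omega

-- the deque append-and-trim step in terms of "last n elements".
lemma pv_buf_step (n : Int) (hn : 1 ≤ n) (xs : List Int) (x : Int) :
    (if n < ((pvBUF n xs ++ [x]).length : Int)
     then (pvBUF n xs ++ [x]).drop (((pvBUF n xs ++ [x]).length : Int) - n).toNat
     else pvBUF n xs ++ [x])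
    = pvBUF n (xs ++ [x]) := by
  have hB2 : pvBUF n (xs ++ [x]) = (xs ++ [x]).drop (xs.length + 1 - n.toNat) := by
    unfold pvBUF
    congr 1
    simp
  rw [hB2]
  unfold pvBUF
  by_cases hc : xs.length < n.toNat
  · have h0 : xs.length - n.toNat = 0 := by omega
    have h2 : xs.length + 1 - n.toNat = 0 := by omega
    have hcond : ¬ n < ((xs.drop (xs.length - n.toNat) ++ [x]).length : Int) := by
      simp [h0] <;> omega
    rw [if_neg hcond, h0, h2]
    simp
  · have hlen : (xs.drop (xs.length - n.toNat)).length = n.toNat := by simp <;> omega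
    have hcond : n < ((xs.drop (xs.length - n.toNat) ++ [x]).length : Int) := by
      simp [hlen] <;> omega
    rw [if_pos hcond]
    have h1 : (((xs.drop (xs.length - n.toNat) ++ [x]).length : Int) - n).toNat = 1 := by
      simp [hlen] <;> omega
    rw [h1, List.drop_append_of_le_length (by omega : 1 ≤ (xs.drop (xs.length - n.toNat)).length),
      List.drop_drop,
      List.drop_append_of_le_length (by omega : xs.length + 1 - n.toNat ≤ xs.length)]
    congr 2
    omega

-- B's output after one more element: the old slices plus (possibly) one new window.
lemma pv_out_step (n t : Int) (hn : 1 ≤ n) (xs : List Int) (x : Int) :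
    pvOUT n t (xs ++ [x]) =
      pvOUT n t xs ++
        (if 0 ≤ (xs.length : Int) + 1 - n ∧ ((xs.length : Int) + 1 - n) % (max t 1) = 0
         then [pvBUF n (xs ++ [x])] else []) := by
  have hs : (0:Int) < max t 1 := by omega
  unfold pvOUT
  have hlen2 : (((xs ++ [x]).length : Nat) : Int) = (xs.length : Int) + 1 := by simp
  rw [hlen2, show (xs.length : Int) + 1 - n + 1 = ((xs.length : Int) + 1 - n) + 1 from by ring,
    pv_pyRange_snoc _ _ hs, List.map_append,
    show (xs.length : Int) - n + 1 = (xs.length : Int) + 1 - n from by ring]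
  congr 1
  · apply List.map_congr_left
    intro i hi
    rw [PySem.List.mem_pyRange_iff_of_pos hs] at hi
    exact pv_slice_append xs x i n hi.1 (by omega) (by omega)
  · by_cases hcond : 0 ≤ (xs.length : Int) + 1 - n ∧ ((xs.length : Int) + 1 - n) % (max t 1) = 0
    · rw [if_pos hcond, if_pos hcond, List.map_cons, List.map_nil]
      congr 1
      rw [pv_slice_last xs x n hn (by omega)]
      simp [pvBUF]
    · rw [if_neg hcond, if_neg hcond]
      simp

-- invariant for A's fold: step_count, buffer and output after any prefix.
lemma pv_foldA_inv (n t : Int) (hn : 1 ≤ n) (xs : List Int) :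
    xs.foldl (ipartA_f n t) (t, ([], ([] : List (List Int)))) =
      (pvSC n t xs, (pvBUF n xs, pvOUT n t xs)) := by
  induction xs using List.reverseRecOn with
  | nil =>
      have hs : (0:Int) < max t 1 := by omega
      rw [List.foldl_nil]
      unfold pvSC pvBUF pvOUT
      rw [PySem.List.pyRange_of_pos _ _ hs]
      have h1 : ¬ ((0:Int) < (([] : List Int).length : Int) - n + 1) := by simp <;> omega
      simp only [List.length_nil, Int.natCast_zero, h1, if_false]
      simp
      omega
  | append_singleton xs x ih =>
      rw [List.foldl_append, List.foldl_cons, List.foldl_nil, ih]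
      set L : Int := (xs.length : Int) with hLdef
      have hL0 : 0 ≤ L := by simp [hLdef]
      have hSC' : pvSC n t (xs ++ [x]) = if n ≤ L + 1 then (L + 1 - n) % (max t 1) else t := by
        unfold pvSC
        have h : (((xs ++ [x]).length : Nat) : Int) = L + 1 := by simp [hLdef]
        rw [h]
      have hfull : (((pvBUF n (xs ++ [x])).length : Int) = n) ↔ n ≤ L + 1 := by
        simp [pvBUF, hLdef] <;> omega
      simp only [ipartA_f]
      rw [pv_buf_step n hn xs x, hSC', pv_out_step n t hn xs x, ← hLdef]
      rcases (by omega : t ≤ 0 ∨ 0 < t) with ht | ht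
      · -- t ≤ 0: the counter test always passes; yield at every full window
        have hs1 : max t 1 = 1 := by omega
        have hsc : min t (pvSC n t xs + 1) = t := by
          unfold pvSC
          rw [hs1]
          split_ifs with h
          · rw [Int.emod_one]; omega
          · omega
        rw [hs1, Int.emod_one, hsc]
        by_cases hy : n ≤ L + 1
        · rw [if_pos (show t = t ∧ (((pvBUF n (xs ++ [x])).length : Nat) : Int) = n from
              ⟨rfl, hfull.mpr hy⟩),
            if_pos (show 0 ≤ L + 1 - n ∧ (0 : Int) = 0 from ⟨by omega, rfl⟩), if_pos hy]
        · rw [if_neg (show ¬ (t = t ∧ (((pvBUF n (xs ++ [x])).length : Nat) : Int) = n) from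
              fun hcon => hy (hfull.mp hcon.2)),
            if_neg (show ¬ (0 ≤ L + 1 - n ∧ (0 : Int) = 0) from by omega), if_neg hy]
          simp
      · -- 1 ≤ t
        have hst : max t 1 = t := by omega
        rw [hst]
        by_cases hnl : n ≤ L
        · have hr0 : 0 ≤ (L - n) % t := Int.emod_nonneg _ (by omega)
          have hrs : (L - n) % t < t := Int.emod_lt_of_pos _ ht
          have hscv : pvSC n t xs = (L - n) % t := by
            unfold pvSC
            rw [if_pos (show n ≤ ((xs.length : Nat) : Int) from by omega), hst]
          have hsucc := pv_emod_succ (L - n) t (by omega)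
          have hmin : min t (pvSC n t xs + 1) = (L - n) % t + 1 := by rw [hscv]; omega
          rw [hmin]
          have hL1 : L + 1 - n = (L - n) + 1 := by ring
          by_cases hyy : (L - n) % t = t - 1
          · have hnew : (L + 1 - n) % t = 0 := by rw [hL1, hsucc, if_pos hyy]
            rw [if_pos (show (L - n) % t + 1 = t ∧
                  (((pvBUF n (xs ++ [x])).length : Nat) : Int) = n from
                  ⟨by omega, hfull.mpr (by omega)⟩),
              if_pos (show 0 ≤ L + 1 - n ∧ (L + 1 - n) % t = 0 from ⟨by omega, hnew⟩),
              if_pos (show n ≤ L + 1 from by omega), hnew]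
          · have hnew : (L + 1 - n) % t = (L - n) % t + 1 := by rw [hL1, hsucc, if_neg hyy]
            rw [if_neg (show ¬ ((L - n) % t + 1 = t ∧
                  (((pvBUF n (xs ++ [x])).length : Nat) : Int) = n) from
                  by rintro ⟨h1, -⟩; omega),
              if_neg (show ¬ (0 ≤ L + 1 - n ∧ (L + 1 - n) % t = 0) from by rw [hnew]; omega),
              if_pos (show n ≤ L + 1 from by omega), hnew]
            simp
        · -- window not yet full: counter stays at t
          have hscv : pvSC n t xs = t := by
            unfold pvSC
            rw [if_neg (show ¬ n ≤ ((xs.length : Nat) : Int) from by omega)]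
          have hmin : min t (pvSC n t xs + 1) = t := by rw [hscv]; omega
          rw [hmin]
          by_cases hy : n ≤ L + 1
          · have hn1 : L + 1 - n = 0 := by omega
            rw [if_pos (show t = t ∧ (((pvBUF n (xs ++ [x])).length : Nat) : Int) = n from
                ⟨rfl, hfull.mpr hy⟩),
              if_pos (show 0 ≤ L + 1 - n ∧ (L + 1 - n) % t = 0 from
                ⟨by omega, by rw [hn1]; simp⟩),
              if_pos hy, hn1, Int.zero_emod]
          · rw [if_neg (show ¬ (t = t ∧ (((pvBUF n (xs ++ [x])).length : Nat) : Int) = n) from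
                fun hcon => hy (hfull.mp hcon.2)),
              if_neg (show ¬ (0 ≤ L + 1 - n ∧ (L + 1 - n) % t = 0) from by omega), if_neg hy]
            simp

-- ===== VERDICT (by name: the statement is the Claim_ definition above) =====
theorem ipartition_py_spec : Claim_equal_ipartition_py := by
  intro n iterable step _ hpre
  unfold Spec_ipartition_py ipartition_py ipartition_py_alt
  exact congrArg (fun p : Int × List Int × List (List Int) => p.2.2)
    (pv_foldA_inv n (step.getD n) hpre iterable)
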